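-- pv_equiv track=rewrite | github.com/Roma4466/test_task_schedule_parser | utils/formatting/str_formatting.py | remove_everything_after_last_digit
-- ===== SOURCE A (Python) =====
-- def remove_everything_after_last_digit(input_str: str) -> str:
--     """
--     Removes all characters after the last digit in the string.
--     :param input_str: f.e '24f46hello'
--     :return: f.e '24f46'
--     """
--     last_digit_index = None
--     for i, char in enumerate(reversed(input_str)):
--         if char.isdigit():
--             last_digit_index = len(input_str) - i - 1
--             break
--     if last_digit_index is not None:
--         return input_str[:last_digit_index + 1]
--     else:
--         return ''
-- ===== SOURCE B (Python) =====
-- def remove_everything_after_last_digit(input_str: str) -> str: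
--     """Removes all characters after the last digit in the string."""
--     while input_str and not input_str[-1].isdigit():
--         input_str = input_str[:-1]
--     return input_str
-- ===== Notes on version B (the rewrite author's own statement) =====
-- stated objective: simpler
-- what changed: B replaces A's reversed-enumerate scan that computes a last-digit index and slices once by a trailing-truncation loop that keeps chopping the last character while it is not a digit, returning the shrunken string itself.
import Mathlib
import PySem

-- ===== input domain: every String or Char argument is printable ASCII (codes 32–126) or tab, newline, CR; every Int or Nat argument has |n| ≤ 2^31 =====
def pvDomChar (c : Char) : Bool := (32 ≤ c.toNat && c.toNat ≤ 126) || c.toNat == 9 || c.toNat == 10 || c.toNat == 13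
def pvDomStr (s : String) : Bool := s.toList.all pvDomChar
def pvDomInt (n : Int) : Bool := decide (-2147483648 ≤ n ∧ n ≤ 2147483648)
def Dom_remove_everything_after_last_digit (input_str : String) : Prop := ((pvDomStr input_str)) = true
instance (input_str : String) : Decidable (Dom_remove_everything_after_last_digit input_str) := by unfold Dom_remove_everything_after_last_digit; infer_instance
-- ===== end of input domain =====

-- B replaces A's reversed-scan-for-index-then-slice by a trailing-truncation loop that drops the last non-digit character until a digit (or empty) remains; objective: simpler.


-- ===== PORT A =====
-- the 'for i, char in enumerate(reversed(input_str)): if char.isdigit(): last_digit_index = …; break'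
-- loop: scans rs (the reversed characters) with counter i, returning the computed index on the first digit.
def pvAFind (n : Nat) (i : Nat) : List Char → Option Nat
  | [] => none
  | c :: rest => if PySem.Chars.isdigit c then some (n - i - 1) else pvAFind n (i + 1) rest

def remove_everything_after_last_digit (input_str : String) : String :=
  match pvAFind input_str.toList.length 0 input_str.toList.reverse with
  | some last_digit_index => String.mk (input_str.toList.take (last_digit_index + 1))  -- input_str[:last_digit_index + 1]
  | none => ""

-- ===== PORT B =====
-- the 'while input_str and not input_str[-1].isdigit(): input_str = input_str[:-1]' loop
def pvBLoop (cs : List Char) : List Char :=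
  if h : cs = [] then cs                                       -- empty: loop ends
  else if PySem.Chars.isdigit (cs.getLast h) then cs           -- last char is a digit: loop ends
  else pvBLoop cs.dropLast                                     -- input_str = input_str[:-1]
termination_by cs.length
decreasing_by
  have hp : 0 < cs.length := List.length_pos_of_ne_nil h
  simp [List.length_dropLast]; omega

def remove_everything_after_last_digit_alt (input_str : String) : String :=
  String.mk (pvBLoop input_str.toList)

-- ===== PRECONDITION & SPEC =====
def Spec_remove_everything_after_last_digit (input_str : String) (out : String) : Prop := out = remove_everything_after_last_digit_alt input_str
instance (input_str : String) (out : String) : Decidable (Spec_remove_everything_after_last_digit input_str out) := by unfold Spec_remove_everything_after_last_digit; infer_instance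

-- ===== CLAIM (what is proved, stated in full; the proofs are below) =====
def Claim_equal_remove_everything_after_last_digit : Prop := ∀ (input_str : String), Dom_remove_everything_after_last_digit input_str → Spec_remove_everything_after_last_digit input_str (remove_everything_after_last_digit input_str)

-- ===== LEMMAS AND PROOFS =====

-- B's loop computes: drop the non-digit prefix of the reversed list, reversed back.
theorem pvBLoop_eq (cs : List Char) :
    pvBLoop cs = (cs.reverse.dropWhile (fun c => ! PySem.Chars.isdigit c)).reverse := by
  induction cs using List.reverseRecOn with
  | nil => rw [pvBLoop]; simp
  | append_singleton ds c ih =>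
    have hne : ds ++ [c] ≠ [] := by simp
    have hlast : (ds ++ [c]).getLast hne = c := List.getLast_append_singleton ds
    rw [pvBLoop, dif_neg hne, hlast]
    simp only [List.reverse_append, List.reverse_cons, List.reverse_nil, List.nil_append,
      List.cons_append, List.dropWhile_cons]
    by_cases hd : PySem.Chars.isdigit c
    · simp [hd]
    · simp [hd, List.dropLast_concat, ih]

-- A's loop, started at offset i into the reversed list, yields the same suffix-truncation.
theorem pvAFind_eq (cs : List Char) (rs : List Char) (i : Nat)
    (hrs : cs.reverse.drop i = rs) :
    (match pvAFind cs.length i rs with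
      | some k => cs.take (k + 1)
      | none => ([] : List Char)) =
    (rs.dropWhile (fun c => ! PySem.Chars.isdigit c)).reverse := by
  induction rs generalizing i with
  | nil => simp [pvAFind]
  | cons c rest ih =>
    have hi : i < cs.length := by
      by_contra h
      have : cs.reverse.drop i = [] := List.drop_eq_nil_of_le (by simpa using le_of_not_gt (by omega))
      rw [hrs] at this; exact List.cons_ne_nil _ _ this
    by_cases hd : PySem.Chars.isdigit c
    · rw [pvAFind, if_pos hd]
      have hk : cs.length - i - 1 + 1 = cs.length - i := by omega
      simp only [hk, List.dropWhile_cons, hd, Bool.not_true, Bool.false_eq_true, if_false]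
      have hrev := congrArg List.reverse hrs
      rw [List.drop_reverse] at hrev
      simp only [List.reverse_reverse] at hrev
      exact hrev
    · rw [pvAFind, if_neg (by simp [hd])]
      have hrest : cs.reverse.drop (i + 1) = rest := by
        have := congrArg (List.drop 1) hrs
        simpa [List.drop_drop, Nat.add_comm] using this
      simpa [List.dropWhile_cons, hd] using ih (i + 1) hrest

-- ===== VERDICT (by name: the statement is the Claim_ definition above) =====
theorem remove_everything_after_last_digit_spec : Claim_equal_remove_everything_after_last_digit := by
  intro s _
  unfold Spec_remove_everything_after_last_digit remove_everything_after_last_digit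
    remove_everything_after_last_digit_alt
  rw [pvBLoop_eq]
  have h := pvAFind_eq s.toList s.toList.reverse 0 (by simp)
  cases hf : pvAFind s.toList.length 0 s.toList.reverse with
  | none =>
    rw [hf] at h
    exact congrArg String.mk h
  | some k =>
    rw [hf] at h
    exact congrArg String.mk h
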